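-- pv_equiv track=rewrite | github.com/Jamirahmad/Vidhi | src/core/response_formatter.py | format_citation_list
-- ===== SOURCE A (Python) =====
-- from typing import Dict, List, Optional, Any, Union
--
-- def format_citation_list(
--
--     citations: List[str],
--     grouped_by_court: bool = False
-- ) -> str:
--     """
--     Format a list of citations.
--
--     Args:
--         citations: List of citation strings
--         grouped_by_court: Whether to group by court type
--
--     Returns:
--         Formatted citation list
--     """
--     if not citations:
--         return "No citations available"
--
--     lines = []
--     lines.append("CITATIONS:")
--     lines.append("-" * 40)
--
--     if grouped_by_court:
--         # Group citations by court
--         sc_citations = [c for c in citations if 'SC' in c]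
--         hc_citations = [c for c in citations if any(x in c for x in ['Del', 'Bom', 'Cal', 'Mad'])]
--         other_citations = [c for c in citations if c not in sc_citations and c not in hc_citations]
--
--         if sc_citations:
--             lines.append("\nSupreme Court:")
--             for citation in sc_citations:
--                 lines.append(f"  • {citation}")
--
--         if hc_citations:
--             lines.append("\nHigh Courts:")
--             for citation in hc_citations:
--                 lines.append(f"  • {citation}")
--
--         if other_citations:
--             lines.append("\nOther Courts:")
--             for citation in other_citations:
--                 lines.append(f"  • {citation}")
--     else:
--         # Simple list
--         for i, citation in enumerate(citations, 1):
--             lines.append(f"{i}. {citation}")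
--
--     return "\n".join(lines)
-- ===== SOURCE B (Python) =====
-- def format_citation_list(citations, grouped_by_court=False):
--     if not citations:
--         return "No citations available"
--     parts = ["CITATIONS:", "-" * 40]
--     if grouped_by_court:
--         sc, hc, other = [], [], []
--         for c in citations:
--             is_sc = 'SC' in c
--             is_hc = 'Del' in c or 'Bom' in c or 'Cal' in c or 'Mad' in c
--             if is_sc:
--                 sc.append(c)
--             if is_hc:
--                 hc.append(c)
--             if not is_sc and not is_hc:
--                 other.append(c)
--         for title, group in (("Supreme Court:", sc), ("High Courts:", hc), ("Other Courts:", other)):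
--             if group:
--                 parts.append("\n" + title)
--                 parts.extend("  \u2022 " + c for c in group)
--     else:
--         parts.extend(f"{i}. {c}" for i, c in enumerate(citations, 1))
--     return "\n".join(parts)
-- ===== Notes on version B (the rewrite author's own statement) =====
-- stated objective: alternative
-- what changed: Replaces A's three separate filter passes (the third testing list membership of each citation in the first two result lists, quadratic in the worst case) with a single pass that computes the SC/HC substring flags once per citation and appends to the right bucket(s), then assembles the sections from a (title, group) table; not measurably faster on the benchmark inputs, where the court lists stay small.
import Mathlib
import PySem

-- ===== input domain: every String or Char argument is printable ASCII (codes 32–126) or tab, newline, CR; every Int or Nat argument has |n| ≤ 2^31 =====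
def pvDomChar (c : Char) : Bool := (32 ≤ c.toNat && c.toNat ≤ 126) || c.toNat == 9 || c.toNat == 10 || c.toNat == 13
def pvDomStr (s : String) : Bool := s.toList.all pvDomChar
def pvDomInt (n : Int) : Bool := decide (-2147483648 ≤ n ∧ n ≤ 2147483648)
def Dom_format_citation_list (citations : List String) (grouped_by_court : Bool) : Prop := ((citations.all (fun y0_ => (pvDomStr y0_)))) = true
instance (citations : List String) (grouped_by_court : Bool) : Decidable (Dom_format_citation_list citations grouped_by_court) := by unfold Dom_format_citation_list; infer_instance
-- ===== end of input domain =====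

-- B replaces A's three filter passes (the third testing list membership in the first two results)
-- by one pass that computes the SC/HC substring flags once per citation and buckets; objective: alternative.

-- ===== PORT A =====
def format_citation_list (citations : List String) (grouped_by_court : Bool) : String :=
  if citations.isEmpty then "No citations available"
  else
    let lines : List String := ["CITATIONS:", String.ofList (PySem.List.pyRepeat "-".toList 40)]
    if grouped_by_court then
      let sc_citations := citations.filter (fun c => PySem.Str.isIn "SC" c)
      let hc_citations := citations.filter (fun c => ["Del", "Bom", "Cal", "Mad"].any (fun x => PySem.Str.isIn x c))
      let other_citations := citations.filter (fun c => !(sc_citations.contains c) && !(hc_citations.contains c))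
      let lines := if !sc_citations.isEmpty then
          sc_citations.foldl (fun ls citation => ls ++ ["  • " ++ citation]) (lines ++ ["\nSupreme Court:"])
        else lines
      let lines := if !hc_citations.isEmpty then
          hc_citations.foldl (fun ls citation => ls ++ ["  • " ++ citation]) (lines ++ ["\nHigh Courts:"])
        else lines
      let lines := if !other_citations.isEmpty then
          other_citations.foldl (fun ls citation => ls ++ ["  • " ++ citation]) (lines ++ ["\nOther Courts:"])
        else lines
      PySem.Str.join "\n" lines
    else
      PySem.Str.join "\n"
        ((PySem.List.enumerate citations 1).foldl
          (fun ls p => ls ++ [PySem.Int.toStr p.1 ++ ". " ++ p.2]) lines)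

-- ===== PORT B =====
def format_citation_list_alt (citations : List String) (grouped_by_court : Bool) : String :=
  if citations.isEmpty then "No citations available"
  else
    let parts : List String := ["CITATIONS:", String.ofList (PySem.List.pyRepeat "-".toList 40)]
    if grouped_by_court then
      let buckets := citations.foldl
        (fun (acc : List String × List String × List String) c =>
          let is_sc := PySem.Str.isIn "SC" c
          let is_hc := PySem.Str.isIn "Del" c || PySem.Str.isIn "Bom" c || PySem.Str.isIn "Cal" c || PySem.Str.isIn "Mad" c
          (if is_sc then acc.1 ++ [c] else acc.1,
           if is_hc then acc.2.1 ++ [c] else acc.2.1,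
           if !is_sc && !is_hc then acc.2.2 ++ [c] else acc.2.2))
        ([], [], [])
      let parts := [("Supreme Court:", buckets.1), ("High Courts:", buckets.2.1), ("Other Courts:", buckets.2.2)].foldl
        (fun ps tg => if tg.2.isEmpty then ps
                      else ps ++ ["\n" ++ tg.1] ++ tg.2.map (fun c => "  • " ++ c)) parts
      PySem.Str.join "\n" parts
    else
      PySem.Str.join "\n"
        (parts ++ (PySem.List.enumerate citations 1).map (fun p => PySem.Int.toStr p.1 ++ ". " ++ p.2))

-- ===== PRECONDITION & SPEC =====
def Spec_format_citation_list (citations : List String) (grouped_by_court : Bool) (out : String) : Prop := out = format_citation_list_alt citations grouped_by_court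
instance (citations : List String) (grouped_by_court : Bool) (out : String) : Decidable (Spec_format_citation_list citations grouped_by_court out) := by unfold Spec_format_citation_list; infer_instance

-- ===== CLAIM (what is proved, stated in full; the proofs are below) =====
def Claim_equal_format_citation_list : Prop := ∀ (citations : List String) (grouped_by_court : Bool), Dom_format_citation_list citations grouped_by_court → Spec_format_citation_list citations grouped_by_court (format_citation_list citations grouped_by_court)

-- ===== LEMMAS AND PROOFS =====

-- B's per-citation HC flag equals A's `any` over the literal list of HC markers.
def pvHCpred (c : String) : Bool :=
  PySem.Str.isIn "Del" c || PySem.Str.isIn "Bom" c || PySem.Str.isIn "Cal" c || PySem.Str.isIn "Mad" c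

theorem pvHC_eq (c : String) :
    (["Del", "Bom", "Cal", "Mad"].any (fun x => PySem.Str.isIn x c)) = pvHCpred c := by
  simp [pvHCpred, Bool.or_assoc]

-- membership in a filtered sublist of l, for an element of l, is just the predicate
theorem pvContains_filter {l : List String} {c : String} (h : c ∈ l) (p : String → Bool) :
    (l.filter p).contains c = p c := by
  cases hp : p c
  · simp [List.contains_eq_mem, List.mem_filter, hp]
  · simp [List.contains_eq_mem, List.mem_filter, h, hp]

-- the single-pass bucket fold computes the three filters
theorem pvBucket (cs : List String) (s h o : List String) :
    cs.foldl
      (fun (acc : List String × List String × List String) c =>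
        let is_sc := PySem.Str.isIn "SC" c
        let is_hc := PySem.Str.isIn "Del" c || PySem.Str.isIn "Bom" c || PySem.Str.isIn "Cal" c || PySem.Str.isIn "Mad" c
        (if is_sc then acc.1 ++ [c] else acc.1,
         if is_hc then acc.2.1 ++ [c] else acc.2.1,
         if !is_sc && !is_hc then acc.2.2 ++ [c] else acc.2.2)) (s, h, o)
    = (s ++ cs.filter (fun c => PySem.Str.isIn "SC" c),
       h ++ cs.filter pvHCpred,
       o ++ cs.filter (fun c => !(PySem.Str.isIn "SC" c) && !(pvHCpred c))) := by
  induction cs generalizing s h o with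
  | nil => simp
  | cons c cs ih =>
    simp only [List.foldl_cons, List.filter_cons, pvHCpred]
    rw [ih]
    split_ifs <;> simp_all [pvHCpred]

theorem format_citation_list_eq (citations : List String) (grouped_by_court : Bool) :
    format_citation_list citations grouped_by_court = format_citation_list_alt citations grouped_by_court := by
  unfold format_citation_list format_citation_list_alt
  cases hne : citations.isEmpty
  · simp only [hne, Bool.false_eq_true, if_false]
    cases grouped_by_court
    · -- simple numbered list: fold-with-append vs map
      simp only [Bool.false_eq_true, if_false, PySem.List.foldl_append_singleton_eq_map]
    · -- grouped: one-pass buckets vs three filters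
      simp only [if_true]
      rw [pvBucket]
      have hother : citations.filter
          (fun c => !((citations.filter (fun c => PySem.Str.isIn "SC" c)).contains c)
                 && !((citations.filter (fun c => ["Del", "Bom", "Cal", "Mad"].any (fun x => PySem.Str.isIn x c))).contains c))
          = citations.filter (fun c => !(PySem.Str.isIn "SC" c) && !(pvHCpred c)) := by
        apply List.filter_congr
        intro c hc
        rw [pvContains_filter hc, pvContains_filter hc, pvHC_eq]
      have hhc : citations.filter (fun c => ["Del", "Bom", "Cal", "Mad"].any (fun x => PySem.Str.isIn x c))
          = citations.filter pvHCpred := by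
        apply List.filter_congr; intro c _; rw [pvHC_eq]
      rw [hother, hhc]
      simp only [List.foldl_cons, List.foldl_nil, List.nil_append]
      cases hs : (citations.filter (fun c => PySem.Str.isIn "SC" c)).isEmpty <;>
        cases hh : (citations.filter pvHCpred).isEmpty <;>
        cases ho : (citations.filter (fun c => !(PySem.Str.isIn "SC" c) && !(pvHCpred c))).isEmpty <;>
        simp only [hs, hh, ho, Bool.not_true, Bool.not_false, if_true, if_false,
          Bool.false_eq_true, Bool.true_eq_false,
          PySem.List.foldl_append_singleton_eq_map, List.append_assoc] <;> rfl
  · simp [hne]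

-- ===== VERDICT (by name: the statement is the Claim_ definition above) =====
theorem format_citation_list_spec : Claim_equal_format_citation_list := by
  intro citations grouped_by_court _
  unfold Spec_format_citation_list
  exact format_citation_list_eq citations grouped_by_court
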